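-- pv_equiv track=rewrite | github.com/HHVinh/124_code_Exercises | exercises57a.py | dan_Xen_Chuoi
-- ===== SOURCE A (Python) =====
-- def dan_Xen_Chuoi(s1,s2):
--     daoNguocChuoiS2 = s2[::-1]
--     maXDoDaiChuoi = max(len(s1),len(s2))
--     chuoiDanXen = ''
--
--     for i in range(maXDoDaiChuoi):
--         if (i < len(s1)):
--             chuoiDanXen += s1[i]
--         if (i < len(s2)):
--             chuoiDanXen += daoNguocChuoiS2[i]
--     return chuoiDanXen
-- ===== SOURCE B (Python) =====
-- def dan_Xen_Chuoi(s1, s2):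
--     rev = s2[::-1]
--     parts = [a + b for a, b in zip(s1, rev)]
--     m = min(len(s1), len(s2))
--     if len(s1) > len(s2):
--         parts.append(s1[m:])
--     elif len(s2) > len(s1):
--         parts.append(rev[m:])
--     return ''.join(parts)
-- ===== Notes on version B (the rewrite author's own statement) =====
-- stated objective: alternative
-- what changed: Replaces the per-iteration length-guarded loop over range(max(len(s1),len(s2))) with a guard-free zip over the common prefix plus a single suffix append of the longer string's tail, joined once.
import Mathlib
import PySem

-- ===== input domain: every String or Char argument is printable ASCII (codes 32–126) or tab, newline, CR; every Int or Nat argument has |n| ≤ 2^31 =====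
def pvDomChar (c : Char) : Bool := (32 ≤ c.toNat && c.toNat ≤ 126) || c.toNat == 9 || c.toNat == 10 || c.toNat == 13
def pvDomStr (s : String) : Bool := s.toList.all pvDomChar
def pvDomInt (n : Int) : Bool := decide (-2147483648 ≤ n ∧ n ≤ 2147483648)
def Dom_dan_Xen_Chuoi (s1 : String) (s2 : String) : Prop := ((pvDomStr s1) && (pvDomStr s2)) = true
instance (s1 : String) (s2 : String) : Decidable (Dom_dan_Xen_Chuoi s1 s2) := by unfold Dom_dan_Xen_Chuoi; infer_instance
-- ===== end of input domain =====

-- B replaces A's length-guarded loop over range(max(len1,len2)) by a guard-free zip over the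
-- common prefix plus one suffix append of the longer side's tail (objective: alternative).

-- ===== PORT A =====
-- Literal transliteration of A: s2[::-1] is List.reverse; the loop over range(max) appends
-- s1[i] / daoNguocChuoiS2[i] under the same guards (indexing via getD is exact: the guard
-- i < length makes the access in range, so no IndexError can occur in Python).
def dan_Xen_Chuoi (s1 : String) (s2 : String) : String :=
  let l1 := s1.toList
  let daoNguocChuoiS2 := s2.toList.reverse
  let maXDoDaiChuoi := max l1.length s2.toList.length
  let chuoiDanXen : List Char :=
    (List.range maXDoDaiChuoi).foldl (fun acc i =>
      let acc := if i < l1.length then acc ++ [l1.getD i ' '] else acc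
      if i < s2.toList.length then acc ++ [daoNguocChuoiS2.getD i ' '] else acc) []
  String.mk chuoiDanXen

-- ===== PORT B =====
-- Literal transliteration of Source B: parts = [a+b for a,b in zip(s1, rev)]; then append the
-- tail of the longer side (s1[m:] or rev[m:]); ''.join(parts) is flatten.
def dan_Xen_Chuoi_alt (s1 : String) (s2 : String) : String :=
  let rev := s2.toList.reverse
  let parts := (s1.toList.zip rev).map (fun p => [p.1, p.2])
  let m := min s1.toList.length s2.toList.length
  let parts :=
    if s2.toList.length < s1.toList.length then parts ++ [s1.toList.drop m]
    else if s1.toList.length < s2.toList.length then parts ++ [rev.drop m]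
    else parts
  String.mk parts.flatten

-- ===== PRECONDITION & SPEC =====
def Spec_dan_Xen_Chuoi (s1 : String) (s2 : String) (out : String) : Prop := out = dan_Xen_Chuoi_alt s1 s2
instance (s1 : String) (s2 : String) (out : String) : Decidable (Spec_dan_Xen_Chuoi s1 s2 out) := by unfold Spec_dan_Xen_Chuoi; infer_instance

-- ===== CLAIM (what is proved, stated in full; the proofs are below) =====
def Claim_equal_dan_Xen_Chuoi : Prop := ∀ (s1 : String) (s2 : String), Dom_dan_Xen_Chuoi s1 s2 → Spec_dan_Xen_Chuoi s1 s2 (dan_Xen_Chuoi s1 s2)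

-- ===== LEMMAS AND PROOFS =====

-- Common characterisation: perfect interleaving with the longer tail appended.
def pvIlv : List Char → List Char → List Char
  | [], ys => ys
  | x :: xs, [] => x :: xs
  | x :: xs, y :: ys => x :: y :: pvIlv xs ys

theorem pvIlv_nil_right (xs : List Char) : pvIlv xs [] = xs := by
  cases xs <;> simp [pvIlv]

theorem pv_flat_ilv (xs : List Char) : ∀ ys : List Char,
    (List.range (max xs.length ys.length)).flatMap
      (fun i => (if i < xs.length then [xs.getD i ' '] else []) ++
                (if i < ys.length then [ys.getD i ' '] else [])) = pvIlv xs ys := by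
  induction xs with
  | nil =>
    intro ys
    induction ys with
    | nil => simp [pvIlv]
    | cons y ys ihy =>
      simp only [List.length_nil, List.length_cons, Nat.max_eq_right (Nat.zero_le _),
        List.range_succ_eq_map, List.flatMap_cons, List.flatMap_map] at *
      simpa [pvIlv] using ihy
  | cons x xs ihx =>
    intro ys
    cases ys with
    | nil =>
      have := ihx []
      simp only [List.length_nil, List.length_cons, Nat.max_eq_left (Nat.zero_le _),
        List.range_succ_eq_map, List.flatMap_cons, List.flatMap_map] at *
      simpa [pvIlv, pvIlv_nil_right] using this
    | cons y ys =>
      have := ihx ys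
      simp only [List.length_cons, Nat.succ_max_succ, List.range_succ_eq_map,
        List.flatMap_cons, List.flatMap_map] at *
      simpa [pvIlv] using this

theorem pv_zip_ilv (xs : List Char) : ∀ ys : List Char,
    ((xs.zip ys).map (fun p => [p.1, p.2])).flatten ++ xs.drop ys.length ++ ys.drop xs.length
      = pvIlv xs ys := by
  induction xs with
  | nil => intro ys; simp [pvIlv]
  | cons x xs ihx =>
    intro ys
    cases ys with
    | nil => simp [pvIlv]
    | cons y ys => simpa [pvIlv] using ihx ys

-- ===== VERDICT (by name: the statement is the Claim_ definition above) =====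
theorem dan_Xen_Chuoi_spec : Claim_equal_dan_Xen_Chuoi := by
  intro s1 s2 _
  unfold Spec_dan_Xen_Chuoi dan_Xen_Chuoi dan_Xen_Chuoi_alt
  simp only []
  set l1 := s1.toList with hl1
  set l2 := s2.toList with hl2
  -- A's loop body is acc ++ g i, so the fold is a flatMap
  have hstep :
      (fun (acc : List Char) (i : Nat) =>
        let acc := if i < l1.length then acc ++ [l1.getD i ' '] else acc
        if i < l2.length then acc ++ [l2.reverse.getD i ' '] else acc)
      = fun acc i => acc ++
          ((if i < l1.length then [l1.getD i ' '] else []) ++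
           (if i < l2.reverse.length then [l2.reverse.getD i ' '] else [])) := by
    funext acc i
    simp only [List.length_reverse]
    split_ifs <;> simp
  rw [hstep, PySem.List.foldl_append_eq_flatMap]
  have hA : (List.range (max l1.length l2.length)).flatMap
      (fun i => (if i < l1.length then [l1.getD i ' '] else []) ++
                (if i < l2.reverse.length then [l2.reverse.getD i ' '] else []))
      = pvIlv l1 l2.reverse := by
    have := pv_flat_ilv l1 l2.reverse
    simpa [List.length_reverse] using this
  have hB := pv_zip_ilv l1 l2.reverse
  rcases Nat.lt_trichotomy l2.length l1.length with h | h | h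
  · rw [if_pos h]
    have hmin : min l1.length l2.length = l2.length := Nat.min_eq_right (Nat.le_of_lt h)
    have hdrop : l2.reverse.drop l1.length = [] :=
      List.drop_eq_nil_of_le (by simpa using Nat.le_of_lt h)
    rw [hA]
    rw [← hB, hdrop, hmin]
    simp [List.length_reverse]
  · rw [if_neg (by omega), if_neg (by omega)]
    have hdrop1 : l1.drop l2.length = [] := List.drop_eq_nil_of_le (by omega)
    have hdrop2 : l2.reverse.drop l1.length = [] :=
      List.drop_eq_nil_of_le (by simpa using Nat.le_of_eq h)
    rw [hA, ← hB]
    simp [List.length_reverse, hdrop1, hdrop2]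
  · rw [if_neg (by omega), if_pos h]
    have hmin : min l1.length l2.length = l1.length := Nat.min_eq_left (Nat.le_of_lt h)
    have hdrop : l1.drop l2.length = [] := List.drop_eq_nil_of_le (Nat.le_of_lt h)
    rw [hA, ← hB]
    simp [List.length_reverse, hmin, hdrop]
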